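-- pv_equiv track=rewrite | github.com/anirudhreddy000/mlally | chat.py | join_chunks
-- ===== SOURCE A (Python) =====
-- def join_chunks(chunks, max_tokens=800):
--     result, token_count = "", 0
--     for chunk in chunks:
--         tokens = len(chunk.split())
--         if token_count + tokens > max_tokens:
--             break
--         result += chunk + " "
--         token_count += tokens
--     return result.strip()
-- ===== SOURCE B (Python) =====
-- def join_chunks(chunks, max_tokens=800):
--     counts = [len(c.split()) for c in chunks]
--     k, total = 0, 0
--     while k < len(counts) and total + counts[k] <= max_tokens:
--         total += counts[k]
--         k += 1
--     return ' '.join(chunks[:k]).strip()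
-- ===== Notes on version B (the rewrite author's own statement) =====
-- stated objective: alternative
-- what changed: B first maps chunks to token counts, computes the cutoff index of the longest prefix whose cumulative count stays within max_tokens, then slices and ' '.join()s that prefix, instead of A's accumulate-a-growing-string-and-break loop.
import Mathlib
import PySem

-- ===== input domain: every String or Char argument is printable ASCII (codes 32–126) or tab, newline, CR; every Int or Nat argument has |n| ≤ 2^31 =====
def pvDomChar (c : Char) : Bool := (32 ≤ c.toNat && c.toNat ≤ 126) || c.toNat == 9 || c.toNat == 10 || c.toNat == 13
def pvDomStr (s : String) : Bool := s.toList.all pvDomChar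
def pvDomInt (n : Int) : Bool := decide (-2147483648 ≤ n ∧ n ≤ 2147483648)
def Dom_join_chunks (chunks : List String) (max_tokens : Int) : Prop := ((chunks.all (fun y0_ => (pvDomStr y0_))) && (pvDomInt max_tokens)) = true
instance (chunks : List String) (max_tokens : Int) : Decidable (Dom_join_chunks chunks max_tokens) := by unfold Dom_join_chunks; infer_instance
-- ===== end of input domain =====

-- B computes the cutoff index up front (map to token counts, find the longest admissible prefix),
-- then slices and joins once, instead of A's accumulate-a-string-and-break loop; same cost, alternative decomposition.

-- ===== PORT A =====
-- A's for-loop with break: recursion over chunks carrying (result, token_count)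
def joinChunksGo (max_tokens : Int) : List String → String → Int → String
  | [], result, _ => result
  | chunk :: rest, result, token_count =>
    let tokens : Int := ((PySem.Str.split₀ chunk).length : Int)
    if token_count + tokens > max_tokens then result
    else joinChunksGo max_tokens rest (result ++ chunk ++ " ") (token_count + tokens)

def join_chunks (chunks : List String) (max_tokens : Int) : String :=
  PySem.Str.strip (joinChunksGo max_tokens chunks "" 0)

-- ===== PORT B =====
-- Source B's while loop computing the cutoff index k over the counts list
def cutIndex (max_tokens : Int) : List Int → Int → Nat
  | [], _ => 0
  | n :: rest, total =>
    if total + n ≤ max_tokens then cutIndex max_tokens rest (total + n) + 1 else 0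

def join_chunks_alt (chunks : List String) (max_tokens : Int) : String :=
  let counts := chunks.map (fun c => ((PySem.Str.split₀ c).length : Int))
  let k := cutIndex max_tokens counts 0
  PySem.Str.strip (PySem.Str.join " " (chunks.take k))

-- ===== PRECONDITION & SPEC =====
def Spec_join_chunks (chunks : List String) (max_tokens : Int) (out : String) : Prop := out = join_chunks_alt chunks max_tokens
instance (chunks : List String) (max_tokens : Int) (out : String) : Decidable (Spec_join_chunks chunks max_tokens out) := by unfold Spec_join_chunks; infer_instance

-- ===== CLAIM (what is proved, stated in full; the proofs are below) =====
def Claim_equal_join_chunks : Prop := ∀ (chunks : List String) (max_tokens : Int), Dom_join_chunks chunks max_tokens → Spec_join_chunks chunks max_tokens (join_chunks chunks max_tokens)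

-- ===== LEMMAS AND PROOFS =====

-- A's loop appends, for the longest admissible prefix, each chunk followed by one space.
theorem joinChunksGo_eq (mt : Int) (chunks : List String) : ∀ (tc : Int) (result : String),
    (joinChunksGo mt chunks result tc).toList =
      result.toList ++
        (((chunks.take (cutIndex mt (chunks.map (fun c => ((PySem.Str.split₀ c).length : Int))) tc)).map
            (fun c => c.toList ++ [' '])).flatten) := by
  induction chunks with
  | nil => intro tc result; simp [joinChunksGo, cutIndex]
  | cons c rest ih =>
    intro tc result
    by_cases h : tc + ((PySem.Str.split₀ c).length : Int) > mt
    · have h' : ¬ (tc + ((PySem.Str.split₀ c).length : Int) ≤ mt) := by omega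
      simp [joinChunksGo, cutIndex, h, h']
    · have h' : tc + ((PySem.Str.split₀ c).length : Int) ≤ mt := by omega
      simp only [joinChunksGo, cutIndex, List.map_cons, if_neg h, if_pos h']
      rw [ih]
      simp

theorem rstrip_append_space (cs : List Char) :
    PySem.Chars.rstrip (cs ++ [' ']) = PySem.Chars.rstrip cs := by
  simp [PySem.Chars.rstrip, PySem.Chars.isspace]

theorem strip_append_space (cs : List Char) :
    PySem.Chars.strip (cs ++ [' ']) = PySem.Chars.strip cs := by
  unfold PySem.Chars.strip PySem.Chars.lstrip
  rw [List.dropWhile_append]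
  by_cases h : (List.dropWhile PySem.Chars.isspace cs).isEmpty
  · rw [if_pos h, List.isEmpty_iff.mp h,
       show List.dropWhile PySem.Chars.isspace [' '] = [] from rfl]
  · simp only [h, Bool.false_eq_true, not_false_eq_true, if_neg]
    exact rstrip_append_space _

-- the space-terminated concatenation is the ' '-join plus one trailing space
theorem flatten_eq_join_append_space (x : List Char) (l : List (List Char)) :
    (((x :: l).map (fun c => c ++ [' '])).flatten) =
      PySem.Chars.join [' '] (x :: l) ++ [' '] := by
  induction l generalizing x with
  | nil => simp [PySem.Chars.join, List.intercalate]
  | cons y l' ih =>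
    simp only [List.map_cons, List.flatten_cons] at *
    rw [ih y]
    have hic : ∀ (sep a b : List Char) (l : List (List Char)),
        sep.intercalate (a :: b :: l) = a ++ sep ++ sep.intercalate (b :: l) := by
      intro sep a b l; simp [List.intercalate, List.intersperse]
    simp [PySem.Chars.join, hic]

-- stripping the space-terminated concatenation equals stripping the ' '-join
theorem strip_flatten_eq_strip_join (l : List (List Char)) :
    PySem.Chars.strip ((l.map (fun c => c ++ [' '])).flatten) =
      PySem.Chars.strip (PySem.Chars.join [' '] l) := by
  cases l with
  | nil => simp [PySem.Chars.join, List.intercalate]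
  | cons x l => rw [flatten_eq_join_append_space, strip_append_space]

theorem join_chunks_eq (chunks : List String) (max_tokens : Int) :
    join_chunks chunks max_tokens = join_chunks_alt chunks max_tokens := by
  unfold join_chunks join_chunks_alt PySem.Str.strip PySem.Str.join
  congr 1
  rw [joinChunksGo_eq]
  simp only [String.toList_empty, List.nil_append]
  have hmap : ∀ (pre : List String), pre.map (fun c => c.toList ++ [' ']) =
      (pre.map String.toList).map (fun cs => cs ++ [' ']) := by
    intro pre; rw [List.map_map]; rfl
  rw [hmap, strip_flatten_eq_strip_join]
  simp only [show ((" " : String).toList) = [' '] from rfl, String.toList_ofList]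

-- ===== VERDICT (by name: the statement is the Claim_ definition above) =====
theorem join_chunks_spec : Claim_equal_join_chunks := by
  intro chunks max_tokens _
  unfold Spec_join_chunks
  exact join_chunks_eq chunks max_tokens
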